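-- pv_equiv track=rewrite | github.com/aspuru-guzik-group/selfies | selfies/grammar_rules.py | get_symbols_from_n
-- ===== SOURCE A (Python) =====
-- from typing import Dict, List, Optional, Set, Tuple
--
-- _index_alphabet = ['[C]', '[Ring1]', '[Ring2]',
--                    '[Branch1_1]', '[Branch1_2]', '[Branch1_3]',
--                    '[Branch2_1]', '[Branch2_2]', '[Branch2_3]',
--                    '[O]', '[N]', '[=N]', '[=C]', '[#C]', '[S]', '[P]']
--
-- def get_symbols_from_n(n: int) -> List[str]:
--     """Converts an integer n into a list of SELFIES symbols that, if
--     passed into ``get_n_from_symbols`` in that order, would have produced n.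
--
--     :param n: an integer from 0 to 4095 inclusive.
--     :return: a list of SELFIES symbols representing n in base
--         ``len(_alphabet_code)``.
--     """
--
--     if n == 0:
--         return [_index_alphabet[0]]
--
--     symbols = []
--     base = len(_index_alphabet)
--     while n:
--         symbols.append(_index_alphabet[n % base])
--         n //= base
--     return symbols[::-1]
-- ===== SOURCE B (Python) =====
-- from typing import List
--
-- _index_alphabet = ['[C]', '[Ring1]', '[Ring2]',
--                    '[Branch1_1]', '[Branch1_2]', '[Branch1_3]',
--                    '[Branch2_1]', '[Branch2_2]', '[Branch2_3]',
--                    '[O]', '[N]', '[=N]', '[=C]', '[#C]', '[S]', '[P]']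
--
-- def get_symbols_from_n(n: int) -> List[str]:
--     base = len(_index_alphabet)
--     if n < base:
--         return [_index_alphabet[n]]
--     return get_symbols_from_n(n // base) + [_index_alphabet[n % base]]
-- ===== Notes on version B (the rewrite author's own statement) =====
-- stated objective: simpler
-- what changed: Replaces the append-then-reverse while-loop (with a special case for zero) by a direct recursive base-16 conversion that emits digits most-significant first, needing neither the reversal nor the zero special case.
-- outside the precondition, e.g. on get_symbols_from_n(-1): A does not finish within the time limit, B returns ['[P]']
import Mathlib
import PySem

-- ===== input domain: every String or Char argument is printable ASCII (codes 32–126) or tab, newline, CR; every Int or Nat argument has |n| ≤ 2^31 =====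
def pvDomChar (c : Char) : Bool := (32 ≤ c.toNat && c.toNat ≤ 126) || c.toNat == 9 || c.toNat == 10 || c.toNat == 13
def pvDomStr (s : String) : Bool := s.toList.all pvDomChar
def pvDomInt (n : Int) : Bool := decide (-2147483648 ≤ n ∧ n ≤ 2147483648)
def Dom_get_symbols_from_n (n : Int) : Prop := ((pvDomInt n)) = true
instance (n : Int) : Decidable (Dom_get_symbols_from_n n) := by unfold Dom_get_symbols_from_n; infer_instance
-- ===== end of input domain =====

-- B replaces A's append-then-reverse while-loop (plus its special case for zero) by a direct
-- recursive base-16 conversion emitting digits most-significant first (objective: simpler).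

-- ===== PORT A =====
def pvIndexAlphabet : List String :=
  ["[C]", "[Ring1]", "[Ring2]",
   "[Branch1_1]", "[Branch1_2]", "[Branch1_3]",
   "[Branch2_1]", "[Branch2_2]", "[Branch2_3]",
   "[O]", "[N]", "[=N]", "[=C]", "[#C]", "[S]", "[P]"]

-- the `while n:` loop; `fuel` (and stopping at n ≤ 0) only makes it total — n.toNat
-- steps always suffice for n > 0, and on n < 0 Python diverges, which Pre_ excludes
def pvALoop : Nat → Int → List String → List String
  | 0, _, symbols => symbols
  | fuel + 1, n, symbols =>
    if 0 < n then
      pvALoop fuel (PySem.Int.floordiv n 16)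
        (symbols ++ [PySem.List.pyGetD pvIndexAlphabet (PySem.Int.mod n 16) ""])
    else symbols

def get_symbols_from_n (n : Int) : List String :=
  if n == 0 then [PySem.List.pyGetD pvIndexAlphabet 0 ""]
  else (PySem.List.slice? (pvALoop n.toNat n []) none none (-1)).getD []

-- ===== PORT B =====
-- fuel is only a totality guard; the fuel-0 value repeats the base case, never reached
-- when started with fuel = n.toNat and the base case is not taken
def pvAltRec : Nat → Int → List String
  | 0, n => [PySem.List.pyGetD pvIndexAlphabet n ""]
  | fuel + 1, n =>
    if n < 16 then [PySem.List.pyGetD pvIndexAlphabet n ""]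
    else pvAltRec fuel (PySem.Int.floordiv n 16) ++
         [PySem.List.pyGetD pvIndexAlphabet (PySem.Int.mod n 16) ""]

def get_symbols_from_n_alt (n : Int) : List String := pvAltRec n.toNat n

-- ===== PRECONDITION & SPEC =====
-- Pre_ excludes n < 0, on which Python A's `while n:` loop never terminates (n //= 16
-- converges to -1), so A returns no value there.
def Pre_get_symbols_from_n (n : Int) : Prop := 0 ≤ n
instance (n : Int) : Decidable (Pre_get_symbols_from_n n) := by unfold Pre_get_symbols_from_n; infer_instance
def pvWitness_get_symbols_from_n : Int := (37)

def Spec_get_symbols_from_n (n : Int) (out : List String) : Prop := out = get_symbols_from_n_alt n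
instance (n : Int) (out : List String) : Decidable (Spec_get_symbols_from_n n out) := by unfold Spec_get_symbols_from_n; infer_instance

-- ===== CLAIM (what is proved, stated in full; the proofs are below) =====
def Claim_equal_get_symbols_from_n : Prop := ∀ (n : Int), Dom_get_symbols_from_n n → Pre_get_symbols_from_n n → Spec_get_symbols_from_n n (get_symbols_from_n n)

-- ===== LEMMAS AND PROOFS =====

-- A's loop appends its digits after the accumulator
theorem pvALoop_acc (fuel : Nat) : ∀ (n : Int) (acc : List String),
    pvALoop fuel n acc = acc ++ pvALoop fuel n [] := by
  induction fuel with
  | zero => intro n acc; simp [pvALoop]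
  | succ f ih =>
    intro n acc
    by_cases h : 0 < n
    · simp only [pvALoop, h, if_true, List.nil_append]
      rw [ih (PySem.Int.floordiv n 16)
            (acc ++ [PySem.List.pyGetD pvIndexAlphabet (PySem.Int.mod n 16) ""]),
          ih (PySem.Int.floordiv n 16)
            ([PySem.List.pyGetD pvIndexAlphabet (PySem.Int.mod n 16) ""])]
      simp
    · simp [pvALoop, h]

-- reversing A's digit list gives B's recursion (fuel counts digits in lockstep)
theorem pvALoop_rev (fuel : Nat) : ∀ (n : Int), 0 < n → n.toNat ≤ fuel →
    (pvALoop fuel n []).reverse = pvAltRec fuel n := by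
  induction fuel with
  | zero => intro n hn hf; omega
  | succ f ih =>
    intro n hn hf
    have hd : PySem.Int.floordiv n 16 = n / 16 := PySem.Int.floordiv_eq_ediv_of_pos (by omega)
    simp only [pvALoop, hn, if_true, List.nil_append, pvAltRec]
    rw [pvALoop_acc]
    by_cases h16 : n < 16
    · have hz : PySem.Int.floordiv n 16 = 0 := by rw [hd]; omega
      have hm : PySem.Int.mod n 16 = n := by
        have := PySem.Int.mod_eq_emod_of_pos (a := n) (b := 16) (by omega)
        omega
      have hstop : pvALoop f 0 [] = [] := by cases f <;> simp [pvALoop]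
      have hm' : n % 16 = n := by omega
      rw [hz, hstop]
      simp [h16, hm']
    · have hpos : 0 < PySem.Int.floordiv n 16 := by rw [hd]; omega
      have hfd : (PySem.Int.floordiv n 16).toNat ≤ f := by rw [hd]; omega
      rw [← ih (PySem.Int.floordiv n 16) hpos hfd]
      simp [h16]

-- ===== VERDICT (by name: the statement is the Claim_ definition above) =====
theorem get_symbols_from_n_spec : Claim_equal_get_symbols_from_n := by
  intro n _ hpre
  unfold Spec_get_symbols_from_n get_symbols_from_n get_symbols_from_n_alt
  by_cases h0 : n = 0
  · subst h0; simp [pvAltRec]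
  · have hn : 0 < n := by unfold Pre_get_symbols_from_n at hpre; omega
    simp only [beq_iff_eq, h0, if_false]
    rw [PySem.List.slice?_none_none_neg_one]
    simp [pvALoop_rev n.toNat n hn (le_refl _)]
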